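-- pv_equiv track=rewrite | github.com/dellindone/leet_code_75 | array_string/min_add_to_make_valid_str.py | addMinimum
-- ===== SOURCE A (Python) =====
-- def addMinimum(word: str) -> int:
--     insertion = 0
--     count_a = count_b = count_c = 0
--
--     for i in word:
--         if i == 'a':
--             if count_b == 0 and count_c == 0:
--                 insertion += 2
--             elif count_b == 1:
--                 insertion += 2
--             count_a = 1
--             count_b = count_c = 0
--
--         elif i == 'b':
--             if count_a == 0 and count_c == 0:
--                 insertion += 2
--             elif count_c == 0 and count_a == 1:
--                 insertion -= 1
--                 count_a = count_c = 0
--             elif count_a == 1: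
--                 insertion -= 1
--             count_b = 1
--
--         elif i == 'c':
--             if count_a == 0 and count_b == 0:
--                 insertion += 2
--             elif count_a == 1 and count_b == 1:
--                 insertion -= 1
--             elif count_a == 1:
--                 insertion -= 1
--             elif count_b == 1:
--                 insertion -= 1
--             count_a = count_b = count_c = 0
--     return insertion
-- ===== SOURCE B (Python) =====
-- def addMinimum(word: str) -> int:
--     s = [ch for ch in word if ch in ('a', 'b', 'c')]
--     if not s:
--         return 0
--     groups = 1 + sum(1 for p, q in zip(s, s[1:]) if q <= p)
--     return 3 * groups - len(s)
-- ===== Notes on version B (the rewrite author's own statement) =====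
-- stated objective: simpler
-- what changed: Replaced A's per-character count_a/count_b/count_c branch automaton by a closed form: keep only the 'abc' characters, count the group boundaries (descents q <= p between neighbours), and return 3*groups - len.
import Mathlib
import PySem

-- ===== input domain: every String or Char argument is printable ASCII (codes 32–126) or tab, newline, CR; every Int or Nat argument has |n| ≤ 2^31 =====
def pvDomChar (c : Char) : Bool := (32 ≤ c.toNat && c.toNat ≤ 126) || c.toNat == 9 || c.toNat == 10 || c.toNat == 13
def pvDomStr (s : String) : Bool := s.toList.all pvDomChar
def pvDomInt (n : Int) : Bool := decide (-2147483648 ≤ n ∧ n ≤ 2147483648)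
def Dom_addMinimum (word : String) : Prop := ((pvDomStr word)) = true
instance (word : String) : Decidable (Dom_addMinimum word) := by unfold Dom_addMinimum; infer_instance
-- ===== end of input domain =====

-- B replaces A's count_a/count_b/count_c branch automaton by a closed form over the
-- 'abc' subsequence (3*groups - length); objective: simpler, same O(n) cost.

-- ===== PORT A =====
-- state: (insertion, count_a, count_b, count_c), exactly A's variables
def stepA (s : Int × Int × Int × Int) (i : Char) : Int × Int × Int × Int :=
  let (ins, ca, cb, cc) := s
  if i = 'a' then
    let ins := if cb = 0 ∧ cc = 0 then ins + 2 else if cb = 1 then ins + 2 else ins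
    (ins, 1, 0, 0)
  else if i = 'b' then
    if ca = 0 ∧ cc = 0 then (ins + 2, ca, 1, cc)
    else if cc = 0 ∧ ca = 1 then (ins - 1, 0, 1, 0)
    else if ca = 1 then (ins - 1, ca, 1, cc)
    else (ins, ca, 1, cc)
  else if i = 'c' then
    if ca = 0 ∧ cb = 0 then (ins + 2, 0, 0, 0)
    else if ca = 1 ∧ cb = 1 then (ins - 1, 0, 0, 0)
    else if ca = 1 then (ins - 1, 0, 0, 0)
    else if cb = 1 then (ins - 1, 0, 0, 0)
    else (ins, 0, 0, 0)
  else (ins, ca, cb, cc)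

def addMinimum (word : String) : Int :=
  (word.toList.foldl stepA (0, 0, 0, 0)).1

-- ===== PORT B =====
def isABC (c : Char) : Bool := c = 'a' || c = 'b' || c = 'c'

-- sum(1 for p, q in zip(s, s[1:]) if q <= p), recursing over neighbour pairs
def descB (p : Char) (l : List Char) : Int :=
  match l with
  | [] => 0
  | q :: qs => (if q ≤ p then 1 else 0) + descB q qs

def addMinimum_alt (word : String) : Int :=
  let s := word.toList.filter isABC
  match s with
  | [] => 0
  | p :: rest => 3 * (1 + descB p rest) - Int.ofNat (p :: rest).length

-- ===== PRECONDITION & SPEC =====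
def Spec_addMinimum (word : String) (out : Int) : Prop := out = addMinimum_alt word
instance (word : String) (out : Int) : Decidable (Spec_addMinimum word out) := by unfold Spec_addMinimum; infer_instance

-- ===== CLAIM (what is proved, stated in full; the proofs are below) =====
def Claim_equal_addMinimum : Prop := ∀ (word : String), Dom_addMinimum word → Spec_addMinimum word (addMinimum word)

-- ===== LEMMAS AND PROOFS =====

-- proof-side cost of the filtered suffix given the last seen abc char ('c' initially)
def costF (p : Char) (l : List Char) : Int :=
  match l with
  | [] => 0
  | q :: qs => (if q ≤ p then 2 else -1) + costF q qs

lemma costF_cons (p q : Char) (t : List Char) :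
    costF p (q :: t) = (if q ≤ p then 2 else -1) + costF q t := rfl

-- A's automaton state corresponding to "last abc char seen was `p`" (start = 'c')
def stA (p : Char) : Int × Int × Int :=
  if p = 'a' then (1, 0, 0) else if p = 'b' then (0, 1, 0) else (0, 0, 0)

lemma foldA (l : List Char) : ∀ (ins : Int) (last : Char),
    last = 'a' ∨ last = 'b' ∨ last = 'c' →
    (l.foldl stepA (ins, stA last)).1 = ins + costF last (l.filter isABC) := by
  induction l with
  | nil => intro ins last _; simp [costF]
  | cons x xs ih =>
    intro ins last hlast
    by_cases hx : x = 'a' ∨ x = 'b' ∨ x = 'c'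
    · have hfilter : (x :: xs).filter isABC = x :: xs.filter isABC := by
        rcases hx with h | h | h <;> simp [h, isABC]
      have hstep : stepA (ins, stA last) x
          = ((if x ≤ last then ins + 2 else ins - 1), stA x) := by
        rcases hx with h | h | h <;> rcases hlast with h' | h' | h' <;>
          subst h <;> subst h' <;> simp [stepA, stA]
      rw [List.foldl_cons, hstep, ih _ x hx, hfilter, costF_cons]
      split_ifs <;> ring
    · push Not at hx
      have hfilter : (x :: xs).filter isABC = xs.filter isABC := by
        simp [List.filter, isABC, hx.1, hx.2.1, hx.2.2]
      have hstep : stepA (ins, stA last) x = (ins, stA last) := by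
        simp [stepA, hx.1, hx.2.1, hx.2.2]
      rw [List.foldl_cons, hstep, hfilter, ih _ last hlast]

lemma costF_eq_desc (l : List Char) : ∀ p, costF p l = 3 * descB p l - Int.ofNat l.length := by
  induction l with
  | nil => intro p; simp [costF, descB]
  | cons q qs ih =>
    intro p
    simp only [costF, descB, ih, List.length_cons, Int.ofNat_eq_natCast]
    push_cast
    split_ifs <;> ring

theorem addMinimum_eq_alt (word : String) : addMinimum word = addMinimum_alt word := by
  unfold addMinimum addMinimum_alt
  have h0 : stA 'c' = ((0 : Int), (0 : Int), (0 : Int)) := by simp [stA]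
  have hA := foldA word.toList 0 'c' (by simp)
  rw [h0] at hA
  rw [hA]
  cases hf : word.toList.filter isABC with
  | nil => simp [costF]
  | cons p rest =>
    have hp : isABC p = true := by
      have hmem : p ∈ word.toList.filter isABC := by rw [hf]; exact List.mem_cons_self
      exact (List.mem_filter.mp hmem).2
    have hle : p ≤ 'c' := by
      simp only [isABC, Bool.or_eq_true, decide_eq_true_eq] at hp
      rcases hp with (h | h) | h <;> subst h <;> decide
    show 0 + costF 'c' (p :: rest) = 3 * (1 + descB p rest) - Int.ofNat (p :: rest).length
    rw [costF_cons, if_pos hle, costF_eq_desc, List.length_cons]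
    simp only [Int.ofNat_eq_natCast]
    push_cast
    ring

-- ===== VERDICT (by name: the statement is the Claim_ definition above) =====
theorem addMinimum_spec : Claim_equal_addMinimum := by
  intro word _
  unfold Spec_addMinimum
  exact addMinimum_eq_alt word
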